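-- pv_equiv track=rewrite | github.com/giggsoinc/marauder-scan-complete | ghost-ai-scanner/dashboard/ui/reports/r3_user.py | _dedup_footprint
-- ===== SOURCE A (Python) =====
-- def _dedup_footprint(evts: list) -> list:
--     """Dedup to latest event per (category, provider) key."""
--     seen: dict = {}
--     for e in evts:
--         key = (e.get("category") or "", e.get("provider") or "")
--         ts = e.get("timestamp") or ""
--         if key not in seen or ts > (seen[key].get("timestamp") or ""):
--             seen[key] = e
--     return list(seen.values())
-- ===== SOURCE B (Python) =====
-- def _dedup_footprint(evts: list) -> list:
--     """Dedup to latest event per (category, provider) key: group first, then take each group's max."""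
--     groups: dict = {}
--     for e in evts:
--         key = (e.get("category") or "", e.get("provider") or "")
--         groups[key] = groups.get(key, []) + [e]
--     return [max(g, key=lambda e: e.get("timestamp") or "") for g in groups.values()]
-- ===== Notes on version B (the rewrite author's own statement) =====
-- stated objective: alternative
-- what changed: Replaces the single-pass keep-the-current-winner dict with two passes: first group all events by (category,provider) in first-seen key order, then take each group's first-maximal event by timestamp via max().
import Mathlib
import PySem

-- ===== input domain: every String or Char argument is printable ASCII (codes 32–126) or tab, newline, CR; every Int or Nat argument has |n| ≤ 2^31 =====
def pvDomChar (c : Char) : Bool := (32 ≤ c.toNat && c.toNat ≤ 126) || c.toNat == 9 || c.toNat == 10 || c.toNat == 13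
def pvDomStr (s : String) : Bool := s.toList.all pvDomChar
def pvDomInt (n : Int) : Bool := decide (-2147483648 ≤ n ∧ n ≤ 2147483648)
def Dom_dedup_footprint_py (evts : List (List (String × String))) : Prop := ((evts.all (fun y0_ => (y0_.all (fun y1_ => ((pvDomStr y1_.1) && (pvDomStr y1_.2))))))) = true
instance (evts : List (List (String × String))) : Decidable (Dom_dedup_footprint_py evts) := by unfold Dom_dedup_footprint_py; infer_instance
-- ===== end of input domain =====

-- B replaces A's single-pass keep-the-winner dict by group-by-key then max-per-group (alternative decomposition, same cost).

-- `e.get(k) or ""` — first-match lookup, None and "" both collapse to "" (expression shared verbatim by A and B)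
def pvGetOr (e : List (String × String)) (k : String) : String :=
  ((e.find? (fun p => p.1 == k)).map (fun p => p.2)).getD ""

-- `(e.get("category") or "", e.get("provider") or "")` (shared verbatim by A and B)
def pvKey (e : List (String × String)) : String × String :=
  (pvGetOr e "category", pvGetOr e "provider")

-- ===== PORT A =====
-- loop body of A: conditional overwrite of the current winner for the event's key
def dedupStepA (seen : PySem.Dict (String × String) (List (String × String)))
    (e : List (String × String)) : PySem.Dict (String × String) (List (String × String)) :=
  if !seen.contains (pvKey e)
      || decide (pvGetOr (seen.getD (pvKey e) []) "timestamp" < pvGetOr e "timestamp")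
  then seen.insert (pvKey e) e else seen

def dedup_footprint_py (evts : List (List (String × String))) : List (List (String × String)) :=
  (evts.foldl dedupStepA PySem.Dict.empty).values

-- ===== PORT B =====
def dedup_footprint_py_alt (evts : List (List (String × String))) : List (List (String × String)) :=
  -- pass 1: groups[key] = groups.get(key, []) + [e]
  ((evts.foldl (fun d e => d.modify (pvKey e) [] (fun g => g ++ [e])) PySem.Dict.empty).values).map
    -- pass 2: max(g, key=...); getD [] only totalizes the (unreachable) empty-group case
    (fun g => (PySem.List.max? g (fun e => pvGetOr e "timestamp")).getD [])

-- ===== PRECONDITION & SPEC =====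
def Spec_dedup_footprint_py (evts : List (List (String × String))) (out : List (List (String × String))) : Prop := out = dedup_footprint_py_alt evts
instance (evts : List (List (String × String))) (out : List (List (String × String))) : Decidable (Spec_dedup_footprint_py evts out) := by unfold Spec_dedup_footprint_py; infer_instance

-- ===== CLAIM (what is proved, stated in full; the proofs are below) =====
def Claim_equal_dedup_footprint_py : Prop := ∀ (evts : List (List (String × String))), Dom_dedup_footprint_py evts → Spec_dedup_footprint_py evts (dedup_footprint_py evts)

-- ===== LEMMAS AND PROOFS =====

theorem stepA_get?_self (d : PySem.Dict (String × String) (List (String × String)))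
    (e : List (String × String)) :
    (dedupStepA d e).get? (pvKey e) =
      match d.get? (pvKey e) with
      | none => some e
      | some m => if pvGetOr m "timestamp" < pvGetOr e "timestamp" then some e else some m := by
  unfold dedupStepA
  rcases h : d.get? (pvKey e) with _ | m
  · have hc : d.contains (pvKey e) = false := (PySem.Dict.get?_eq_none_iff_contains d _).mp h
    simp [hc, PySem.Dict.get?_insert_self]
  · have hc : d.contains (pvKey e) = true := by
      cases hcc : d.contains (pvKey e)
      · rw [← PySem.Dict.get?_eq_none_iff_contains] at hcc; rw [h] at hcc; exact absurd hcc (by simp)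
      · rfl
    have hD : d.getD (pvKey e) [] = m := PySem.Dict.getD_of_get?_eq_some d [] h
    by_cases ht : pvGetOr m "timestamp" < pvGetOr e "timestamp"
    · simp [hc, hD, ht, PySem.Dict.get?_insert_self]
    · simp [hc, hD, ht, h]

theorem stepA_get?_ne (d : PySem.Dict (String × String) (List (String × String)))
    (e : List (String × String)) (c : String × String) (h : pvKey e ≠ c) :
    (dedupStepA d e).get? c = d.get? c := by
  unfold dedupStepA
  split_ifs
  · exact PySem.Dict.get?_insert_of_ne d e (Ne.symm h)
  · rfl

theorem A_get? (evts : List (List (String × String)))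
    (d : PySem.Dict (String × String) (List (String × String))) (c : String × String) :
    (evts.foldl dedupStepA d).get? c =
      (evts.filter (fun e => pvKey e == c)).foldl
        (fun acc e => match acc with
          | none => some e
          | some m => if pvGetOr m "timestamp" < pvGetOr e "timestamp" then some e else some m)
        (d.get? c) := by
  induction evts generalizing d with
  | nil => rfl
  | cons e rest ih =>
    simp only [List.foldl_cons, List.filter_cons]
    by_cases hk : pvKey e = c
    · subst hk
      simp only [beq_self_eq_true, if_pos, List.foldl_cons]
      rw [ih, stepA_get?_self]
    · have : (pvKey e == c) = false := beq_eq_false_iff_ne.mpr hk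
      simp only [this, Bool.false_eq_true, if_neg, not_false_iff]
      rw [ih, stepA_get?_ne d e c hk]

theorem stepA_keys (d : PySem.Dict (String × String) (List (String × String)))
    (e : List (String × String)) :
    (dedupStepA d e).keys = PySem.Set.add d.keys (pvKey e) := by
  unfold dedupStepA
  cases hc : d.contains (pvKey e)
  · have hmem : pvKey e ∉ d.keys := by
      intro hm
      rw [(PySem.Dict.contains_iff_mem_keys d (pvKey e)).mpr hm] at hc
      exact absurd hc (by simp)
    simp [PySem.Dict.keys_insert_of_not_contains d e hc, PySem.Set.add, PySem.Set.contains, hmem]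
  · have hmem : pvKey e ∈ d.keys := (PySem.Dict.contains_iff_mem_keys d (pvKey e)).mp hc
    have hadd : PySem.Set.add d.keys (pvKey e) = d.keys := by
      simp [PySem.Set.add, PySem.Set.contains, hmem]
    split_ifs
    · rw [PySem.Dict.keys_insert_of_contains d e hc, hadd]
    · rw [hadd]

theorem A_keys (evts : List (List (String × String)))
    (d : PySem.Dict (String × String) (List (String × String))) :
    (evts.foldl dedupStepA d).keys = PySem.Set.update d.keys (evts.map pvKey) := by
  induction evts generalizing d with
  | nil => rfl
  | cons e rest ih =>
    simp only [List.foldl_cons, List.map_cons]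
    rw [ih]
    show PySem.Set.update (dedupStepA d e).keys (rest.map pvKey)
      = List.foldl PySem.Set.add (PySem.Set.add d.keys (pvKey e)) (rest.map pvKey)
    rw [stepA_keys]
    rfl

theorem A_nodup_keys (evts : List (List (String × String)))
    (d : PySem.Dict (String × String) (List (String × String))) (h : d.keys.Nodup) :
    (evts.foldl dedupStepA d).keys.Nodup := by
  induction evts generalizing d with
  | nil => exact h
  | cons e rest ih =>
    refine ih _ ?_
    unfold dedupStepA
    split_ifs
    · exact PySem.Dict.nodup_keys_insert d _ e h
    · exact h

theorem B_getD (evts : List (List (String × String))) (c : String × String) :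
    ((evts.foldl (fun d e => d.modify (pvKey e) [] (fun g => g ++ [e])) PySem.Dict.empty).getD c [])
      = evts.filter (fun e => pvKey e == c) := by
  have h1 : evts.foldl (fun d e => d.modify (pvKey e) [] (fun g => g ++ [e])) PySem.Dict.empty
      = (evts.map (fun e => (pvKey e, e))).foldl
          (fun d p => d.modify p.1 [] (fun g => g ++ [p.2])) PySem.Dict.empty := by
    rw [List.foldl_map]
  rw [h1, PySem.Dict.getD_foldl_modify_append]
  simp [List.filter_map, Function.comp_def]

theorem dedup_agree (evts : List (List (String × String))) :
    dedup_footprint_py evts = dedup_footprint_py_alt evts := by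
  unfold dedup_footprint_py dedup_footprint_py_alt
  have hAnd := A_nodup_keys evts PySem.Dict.empty (by simp)
  have hBnd := PySem.Dict.nodup_keys_foldl_modify_key evts pvKey []
      (fun _ e => fun g => g ++ [e]) PySem.Dict.empty (by simp)
  rw [PySem.Dict.values_eq_map_keys _ hAnd [], PySem.Dict.values_eq_map_keys _ hBnd []]
  rw [List.map_map]
  have hAk := A_keys evts PySem.Dict.empty
  have hBk := PySem.Dict.keys_foldl_modify_key evts pvKey []
      (fun _ e => fun g => g ++ [e]) PySem.Dict.empty
  rw [hAk, hBk, PySem.Dict.keys_empty]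
  refine List.map_congr_left (fun c _ => ?_)
  rw [PySem.Dict.getD_eq_get?_getD, A_get?, PySem.Dict.get?_empty]
  simp only [Function.comp_apply]
  rw [B_getD]
  simp only [PySem.List.max?]
  congr 1
  apply PySem.List.foldl_congr_mem
  intro acc x _
  cases acc with
  | none => rfl
  | some m =>
    by_cases h : pvGetOr m "timestamp" < pvGetOr x "timestamp" <;> simp [h]

-- ===== VERDICT (by name: the statement is the Claim_ definition above) =====
theorem dedup_footprint_py_spec : Claim_equal_dedup_footprint_py := by
  intro evts _
  unfold Spec_dedup_footprint_py
  exact dedup_agree evts
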